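-- pv_equiv track=rewrite | github.com/tactical-retreat/rpad-cogs-utils | pad_api_data/pad_etl/processor/enemy_skillset_processor.py | remove_duplicate_behaviour
-- ===== SOURCE A (Python) =====
-- def remove_duplicate_behaviour(data: list, start: int, end: int) -> list:
--     """
--     Helper: remove any behaviour that occurs more than once in the set
--     """
--     for idx in range(start, end):
--         if data[idx] is None:
--             continue
--         del_idx = False
--         for jdx in range(idx + 1, end):
--             if data[jdx] is None:
--                 continue
--             if data[idx] == data[jdx]:
--                 del_idx = True
--                 data[jdx] = None
--         if del_idx:
--             data[idx] = None
--     return data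
-- ===== SOURCE B (Python) =====
-- def remove_duplicate_behaviour(data: list, start: int, end: int) -> list:
--     """
--     Helper: remove any behaviour that occurs more than once in the set
--     (single pass with a first-seen index table instead of a nested rescan)
--     """
--     first_seen = {}
--     for idx in range(start, end):
--         value = data[idx]
--         if value is None:
--             continue
--         if value in first_seen:
--             data[idx] = None
--             data[first_seen[value]] = None
--         else:
--             first_seen[value] = idx
--     return data
-- ===== Notes on version B (the rewrite author's own statement) =====
-- stated objective: alternative
-- what changed: Replaced A's nested rescan (for each index, scan the rest of the window for equal values) by a single pass that keeps a dict from each value to its first index and nulls both the current and the recorded first occurrence on a repeat; a timing run found no measurable speed difference on the generated inputs.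
-- outside the precondition, e.g. on remove_duplicate_behaviour([1, 1], -2, 2): A returns [None, None], B returns [None, None]
import Mathlib
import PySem

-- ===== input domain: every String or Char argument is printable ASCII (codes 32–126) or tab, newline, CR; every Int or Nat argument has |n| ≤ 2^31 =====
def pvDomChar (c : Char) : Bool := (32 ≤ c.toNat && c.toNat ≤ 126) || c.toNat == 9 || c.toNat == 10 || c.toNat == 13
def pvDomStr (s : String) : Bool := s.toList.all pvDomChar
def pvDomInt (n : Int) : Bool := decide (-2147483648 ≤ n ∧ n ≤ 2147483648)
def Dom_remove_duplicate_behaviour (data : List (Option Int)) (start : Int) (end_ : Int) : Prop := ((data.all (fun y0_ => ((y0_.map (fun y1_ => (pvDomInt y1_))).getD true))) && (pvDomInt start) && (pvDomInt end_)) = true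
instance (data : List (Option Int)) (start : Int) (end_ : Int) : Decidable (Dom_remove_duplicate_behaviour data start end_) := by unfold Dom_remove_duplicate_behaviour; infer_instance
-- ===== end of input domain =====

-- B replaces A's nested rescan by a single pass with a first-seen-index table (the same
-- in-place nulling of every value occurring more than once in data[start:end]); the
-- equivalence is about the RETURN value (the Python versions mutate `data` in place).


-- ===== PORT A =====
-- Literal port of A's two nested loops over range; data[i] reads use pyGetD (total form) and
-- data[i] = None writes use pySetD: under Pre_ every accessed index is in range, so they are
-- exact (pyGet?/pySet? return none exactly where Python raises IndexError; those inputs are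
-- excluded by Pre_ below).
def remove_duplicate_behaviour (data : List (Option Int)) (start : Int) (end_ : Int) : List (Option Int) :=
  (PySem.List.pyRange start end_ 1).foldl (fun d idx =>
    if PySem.List.pyGetD d idx none = none then d
    else
      let st := (PySem.List.pyRange (idx + 1) end_ 1).foldl
        (fun (st : List (Option Int) × Bool) jdx =>
          if PySem.List.pyGetD st.1 jdx none = none then st
          else if PySem.List.pyGetD st.1 idx none = PySem.List.pyGetD st.1 jdx none then
            (PySem.List.pySetD st.1 jdx none, true)
          else st) (d, false)
      if st.2 then PySem.List.pySetD st.1 idx none else st.1) data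

-- ===== PORT B =====
-- Literal port of B: one pass keeping a dict from value to first index seen.
def remove_duplicate_behaviour_alt (data : List (Option Int)) (start : Int) (end_ : Int) : List (Option Int) :=
  ((PySem.List.pyRange start end_ 1).foldl (fun (st : List (Option Int) × PySem.Dict Int Int) idx =>
    match PySem.List.pyGetD st.1 idx none with
    | none => st
    | some v =>
      match st.2.get? v with
      | some fi => (PySem.List.pySetD (PySem.List.pySetD st.1 idx none) fi none, st.2)
      | none => (st.1, st.2.insert v idx))
    (data, PySem.Dict.empty)).1

-- ===== PRECONDITION & SPEC =====
-- Pre_ excludes (a) windows reaching an index out of [-len, len), on which A raises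
-- IndexError, and (b) windows with a negative start, where Python's negative-index
-- wraparound makes distinct range positions alias the same list cells — an accident of
-- index arithmetic that A happens to survive (B returns the same value there too, but the
-- behaviour is not part of the function's intent, so the claim does not cover it).
def Pre_remove_duplicate_behaviour (data : List (Option Int)) (start : Int) (end_ : Int) : Prop :=
  end_ ≤ start ∨ (0 ≤ start ∧ end_ ≤ PySem.List.len data)
instance (data : List (Option Int)) (start : Int) (end_ : Int) : Decidable (Pre_remove_duplicate_behaviour data start end_) := by unfold Pre_remove_duplicate_behaviour; infer_instance

def pvWitness_remove_duplicate_behaviour : List (Option Int) × Int × Int :=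
  ([some 3, some 1, none, some 3, some 2, some 1], 0, 6)

def Spec_remove_duplicate_behaviour (data : List (Option Int)) (start : Int) (end_ : Int) (out : List (Option Int)) : Prop := out = remove_duplicate_behaviour_alt data start end_
instance (data : List (Option Int)) (start : Int) (end_ : Int) (out : List (Option Int)) : Decidable (Spec_remove_duplicate_behaviour data start end_ out) := by unfold Spec_remove_duplicate_behaviour; infer_instance

-- ===== CLAIM (what is proved, stated in full; the proofs are below) =====
def Claim_equal_remove_duplicate_behaviour : Prop := ∀ (data : List (Option Int)) (start : Int) (end_ : Int), Dom_remove_duplicate_behaviour data start end_ → Pre_remove_duplicate_behaviour data start end_ → Spec_remove_duplicate_behaviour data start end_ (remove_duplicate_behaviour data start end_)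

-- ===== LEMMAS AND PROOFS =====

def pvBodyA (e : Int) (d : List (Option Int)) (idx : Int) : List (Option Int) :=
  if PySem.List.pyGetD d idx none = none then d
  else
    let st := (PySem.List.pyRange (idx + 1) e 1).foldl
      (fun (st : List (Option Int) × Bool) jdx =>
        if PySem.List.pyGetD st.1 jdx none = none then st
        else if PySem.List.pyGetD st.1 idx none = PySem.List.pyGetD st.1 jdx none then
          (PySem.List.pySetD st.1 jdx none, true)
        else st) (d, false)
    if st.2 then PySem.List.pySetD st.1 idx none else st.1

-- The loop body of port B.
def pvBodyB (st : List (Option Int) × PySem.Dict Int Int) (idx : Int) :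
    List (Option Int) × PySem.Dict Int Int :=
  match PySem.List.pyGetD st.1 idx none with
  | none => st
  | some v =>
    match st.2.get? v with
    | some fi => (PySem.List.pySetD (PySem.List.pySetD st.1 idx none) fi none, st.2)
    | none => (st.1, st.2.insert v idx)


def pvNullB (orig : List (Option Int)) (s m k : Nat) : Prop :=
  s ≤ k ∧ k < m ∧ ∃ j, s ≤ j ∧ j < m ∧ j ≠ k ∧
    orig.getD j none = orig.getD k none ∧ orig.getD k none ≠ none
def pvInvList (orig : List (Option Int)) (P : Nat → Prop) (d : List (Option Int)) : Prop :=
  d.length = orig.length ∧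
    ∀ k, (P k → d.getD k none = none) ∧ (¬ P k → d.getD k none = orig.getD k none)
def pvDictInv (orig : List (Option Int)) (s m : Nat) (dd : PySem.Dict Int Int) : Prop :=
  (∀ v i, dd.get? v = some i →
      ∃ j : Nat, i = (j : Int) ∧ s ≤ j ∧ j < m ∧ orig.getD j none = some v) ∧
  (∀ v (j : Nat), s ≤ j → j < m → orig.getD j none = some v → dd.get? v ≠ none)

def pvNullA (orig : List (Option Int)) (s e m k : Nat) : Prop :=
  s ≤ k ∧ k < e ∧ ∃ j, s ≤ j ∧ j < e ∧ j ≠ k ∧ (k < m ∨ j < m) ∧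
    orig.getD j none = orig.getD k none ∧ orig.getD k none ≠ none


theorem pvA_eq_fold (data : List (Option Int)) (start end_ : Int) :
    remove_duplicate_behaviour data start end_
      = (PySem.List.pyRange start end_ 1).foldl (pvBodyA end_) data := rfl

theorem pvB_eq_fold (data : List (Option Int)) (start end_ : Int) :
    remove_duplicate_behaviour_alt data start end_
      = ((PySem.List.pyRange start end_ 1).foldl pvBodyB (data, PySem.Dict.empty)).1 := rfl


theorem pvInvList_unique (orig : List (Option Int)) (P : Nat → Prop)
    (d1 d2 : List (Option Int)) (h1 : pvInvList orig P d1) (h2 : pvInvList orig P d2) :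
    d1 = d2 := by
  obtain ⟨l1, h1⟩ := h1
  obtain ⟨l2, h2⟩ := h2
  apply List.ext_getElem (by omega)
  intro k hk1 hk2
  have e1 : d1.getD k none = d1[k] := List.getD_eq_getElem d1 none hk1
  have e2 : d2.getD k none = d2[k] := List.getD_eq_getElem d2 none hk2
  by_cases hP : P k
  · rw [← e1, ← e2, (h1 k).1 hP, (h2 k).1 hP]
  · rw [← e1, ← e2, (h1 k).2 hP, (h2 k).2 hP]


theorem pvGetD_set (xs : List (Option Int)) (j k : Nat) :
    (xs.set j none).getD k none = if j = k ∧ j < xs.length then none else xs.getD k none := by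
  simp [List.getD_eq_getElem?_getD, List.getElem?_set]
  split_ifs <;> simp_all

theorem pvFoldB_succ (orig : List (Option Int)) (s m : Nat) (h : s ≤ m) :
    (PySem.List.pyRange (s : Int) ((m + 1 : Nat) : Int) 1).foldl pvBodyB (orig, PySem.Dict.empty)
      = pvBodyB ((PySem.List.pyRange (s : Int) (m : Int) 1).foldl pvBodyB (orig, PySem.Dict.empty)) (m : Int) := by
  have h1 : ((m + 1 : Nat) : Int) = (m : Int) + 1 := by push_cast; ring
  rw [h1, PySem.List.pyRange_one_succ_right (by exact_mod_cast h), List.foldl_append]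
  rfl

theorem pvLoopB_inv (orig : List (Option Int)) (s : Nat) (hs : s ≤ orig.length)
    (m : Nat) (hsm : s ≤ m) (hme : m ≤ orig.length) :
    pvInvList orig (pvNullB orig s m)
      (((PySem.List.pyRange (s : Int) (m : Int) 1).foldl pvBodyB (orig, PySem.Dict.empty)).1) ∧
    pvDictInv orig s m
      (((PySem.List.pyRange (s : Int) (m : Int) 1).foldl pvBodyB (orig, PySem.Dict.empty)).2) := by
  induction m, hsm using Nat.le_induction with
  | base =>
    rw [PySem.List.pyRange_one_eq_nil le_rfl]
    refine ⟨⟨rfl, fun k => ⟨fun hP => (by obtain ⟨a, b, _⟩ := hP; omega), fun _ => rfl⟩⟩, ?_, ?_⟩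
    · intro v i hv; simp [PySem.Dict.get?_empty] at hv
    · intro v j h1 h2; omega
  | succ m hsm ih =>
    have hm1 : m ≤ orig.length := by omega
    obtain ⟨⟨hLlen, hLk⟩, hD1, hD2⟩ := ih hm1
    rw [pvFoldB_succ orig s m hsm]
    set st := (PySem.List.pyRange (s : Int) (m : Int) 1).foldl pvBodyB (orig, PySem.Dict.empty) with hst
    have hLm : st.1.getD m none = orig.getD m none :=
      (hLk m).2 (fun hP => absurd hP.2.1 (lt_irrefl m))
    unfold pvBodyB
    simp only [PySem.List.pyGetD_natCast, List.getD_eq_getElem?_getD]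
    rw [← List.getD_eq_getElem?_getD, hLm]
    cases h0 : orig.getD m none with
    | none =>
      dsimp only
      have hiff : ∀ k, pvNullB orig s (m + 1) k ↔ pvNullB orig s m k := by
        intro k
        constructor
        · rintro ⟨h1, h2, j, hj1, hj2, hj3, hj4, hj5⟩
          have hkm : k ≠ m := by intro h; rw [h, h0] at hj5; exact hj5 rfl
          have hjm : j ≠ m := by intro h; rw [h, h0] at hj4; exact hj5 hj4.symm
          exact ⟨h1, by omega, j, hj1, by omega, hj3, hj4, hj5⟩
        · rintro ⟨h1, h2, j, hj1, hj2, hj3, hj4, hj5⟩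
          exact ⟨h1, by omega, j, hj1, by omega, hj3, hj4, hj5⟩
      refine ⟨⟨hLlen, fun k => ⟨fun hP => (hLk k).1 ((hiff k).1 hP),
                fun hP => (hLk k).2 (fun q => hP ((hiff k).2 q))⟩⟩, ?_, ?_⟩
      · intro v i hv
        obtain ⟨j, hj⟩ := hD1 v i hv
        exact ⟨j, hj.1, hj.2.1, by omega, hj.2.2.2⟩
      · intro v j h1 h2 h3
        rcases Nat.lt_or_ge j m with hj | hj
        · exact hD2 v j h1 hj h3
        · have hjm : j = m := by omega
          rw [hjm, h0] at h3; exact absurd h3 (by simp)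
    | some v =>
      dsimp only
      cases hDv : st.2.get? v with
      | none =>
        dsimp only
        have hnov : ∀ j, s ≤ j → j < m → orig.getD j none ≠ some v := by
          intro j h1 h2 h3
          exact (hD2 v j h1 h2 h3) hDv
        have hiff : ∀ k, pvNullB orig s (m + 1) k ↔ pvNullB orig s m k := by
          intro k
          constructor
          · rintro ⟨h1, h2, j, hj1, hj2, hj3, hj4, hj5⟩
            rcases Nat.lt_or_ge k m with hkm | hkm
            · rcases Nat.lt_or_ge j m with hjm | hjm
              · exact ⟨h1, hkm, j, hj1, hjm, hj3, hj4, hj5⟩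
              · have hjm' : j = m := by omega
                rw [hjm', h0] at hj4
                exact absurd hj4.symm (hnov k h1 hkm)
            · have hkm' : k = m := by omega
              rw [hkm', h0] at hj5 hj4
              have hjm : j < m := by omega
              exact absurd hj4 (hnov j hj1 hjm)
          · rintro ⟨h1, h2, j, hj1, hj2, hj3, hj4, hj5⟩
            exact ⟨h1, by omega, j, hj1, by omega, hj3, hj4, hj5⟩
        refine ⟨⟨hLlen, fun k => ⟨fun hP => (hLk k).1 ((hiff k).1 hP),
                  fun hP => (hLk k).2 (fun q => hP ((hiff k).2 q))⟩⟩, ?_, ?_⟩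
        · intro w i hw
          rw [PySem.Dict.get?_insert] at hw
          by_cases hwv : w = v
          · subst hwv
            rw [if_pos rfl] at hw
            refine ⟨m, (Option.some.injEq _ _ ▸ hw).symm ▸ rfl, hsm, by omega, h0⟩
          · rw [if_neg hwv] at hw
            obtain ⟨j, hj⟩ := hD1 w i hw
            exact ⟨j, hj.1, hj.2.1, by omega, hj.2.2.2⟩
        · intro w j h1 h2 h3
          rw [PySem.Dict.get?_insert]
          by_cases hwv : w = v
          · simp [hwv]
          · rw [if_neg hwv]
            rcases Nat.lt_or_ge j m with hj | hj
            · exact hD2 w j h1 hj h3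
            · have hjm : j = m := by omega
              rw [hjm, h0] at h3
              exact absurd (Option.some.injEq _ _ ▸ h3 : v = w).symm hwv
      | some fi =>
        dsimp only
        obtain ⟨j0, hfi, hj01, hj02, hj03⟩ := hD1 v fi hDv
        subst hfi
        simp only [PySem.List.pySetD_natCast]
        have hlen2 : ((st.1.set m none).set j0 none).length = orig.length := by
          simp [hLlen]
        have hj0L : j0 < (st.1.set m none).length := by simp [hLlen]; omega
        have hmL : m < st.1.length := by omega
        have hPm : pvNullB orig s (m + 1) m :=
          ⟨hsm, by omega, j0, hj01, by omega, by omega, by rw [hj03, h0], by rw [h0]; simp⟩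
        have hPj0 : pvNullB orig s (m + 1) j0 :=
          ⟨hj01, by omega, m, hsm, by omega, by omega, by rw [hj03, h0], by rw [hj03]; simp⟩
        refine ⟨⟨hlen2, fun k => ⟨?_, ?_⟩⟩, ?_, ?_⟩
        · intro hP
          rw [pvGetD_set]
          by_cases hkj0 : j0 = k
          · rw [if_pos ⟨hkj0, hj0L⟩]
          · rw [if_neg (by tauto), pvGetD_set]
            by_cases hkm : m = k
            · rw [if_pos ⟨hkm, hmL⟩]
            · rw [if_neg (by tauto)]
              obtain ⟨h1, h2, j, hj1, hj2, hj3, hj4, hj5⟩ := hP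
              have hkm' : k < m := by omega
              rcases Nat.lt_or_ge j m with hjm | hjm
              · exact (hLk k).1 ⟨h1, hkm', j, hj1, hjm, hj3, hj4, hj5⟩
              · have hjm' : j = m := by omega
                rw [hjm', h0] at hj4
                exact (hLk k).1 ⟨h1, hkm', j0, hj01, hj02, (by omega : j0 ≠ k),
                  by rw [hj03, hj4], hj5⟩
        · intro hP
          have hkj0 : k ≠ j0 := fun h => hP (h ▸ hPj0)
          have hkm : k ≠ m := fun h => hP (h ▸ hPm)
          rw [pvGetD_set, if_neg (by tauto), pvGetD_set, if_neg (by tauto)]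
          refine (hLk k).2 (fun q => hP ?_)
          obtain ⟨h1, h2, j, hj1, hj2, hj3, hj4, hj5⟩ := q
          exact ⟨h1, by omega, j, hj1, by omega, hj3, hj4, hj5⟩
        · intro w i hw
          obtain ⟨j, hj⟩ := hD1 w i hw
          exact ⟨j, hj.1, hj.2.1, by omega, hj.2.2.2⟩
        · intro w j h1 h2 h3
          rcases Nat.lt_or_ge j m with hj | hj
          · exact hD2 w j h1 hj h3
          · have hjm : j = m := by omega
            rw [hjm, h0] at h3
            have hwv : w = v := by exact (Option.some.injEq _ _ ▸ h3 : v = w).symm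
            rw [hwv, hDv]; simp
-- Inner loop of A, with a variable upper bound for induction.
def pvInnerUpto (idx b : Int) (d : List (Option Int)) : List (Option Int) × Bool :=
  (PySem.List.pyRange (idx + 1) b 1).foldl
    (fun (st : List (Option Int) × Bool) jdx =>
      if PySem.List.pyGetD st.1 jdx none = none then st
      else if PySem.List.pyGetD st.1 idx none = PySem.List.pyGetD st.1 jdx none then
        (PySem.List.pySetD st.1 jdx none, true)
      else st) (d, false)

theorem pvBodyA_eq (e : Int) (d : List (Option Int)) (idx : Int) :
    pvBodyA e d idx =
      if PySem.List.pyGetD d idx none = none then d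
      else if (pvInnerUpto idx e d).2 then PySem.List.pySetD (pvInnerUpto idx e d).1 idx none
        else (pvInnerUpto idx e d).1 := rfl

theorem pvInnerUpto_succ (m t : Nat) (d : List (Option Int)) (h : m + 1 ≤ t) :
    pvInnerUpto (m : Int) ((t + 1 : Nat) : Int) d =
      (fun (st : List (Option Int) × Bool) jdx =>
        if PySem.List.pyGetD st.1 jdx none = none then st
        else if PySem.List.pyGetD st.1 (m : Int) none = PySem.List.pyGetD st.1 jdx none then
          (PySem.List.pySetD st.1 jdx none, true)
        else st) (pvInnerUpto (m : Int) (t : Int) d) (t : Int) := by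
  unfold pvInnerUpto
  have h1 : ((t + 1 : Nat) : Int) = (t : Int) + 1 := by push_cast; ring
  rw [h1, PySem.List.pyRange_one_succ_right (by exact_mod_cast h), List.foldl_append]
  rfl

theorem pvInnerA_inv (orig d : List (Option Int)) (s e m : Nat) (v : Int)
    (he : e ≤ orig.length) (hsm : s ≤ m) (hme : m < e)
    (hlen : d.length = orig.length)
    (hdm : d.getD m none = some v)
    (hchar : ∀ k, m < k → k < e → (d.getD k none = some v ↔ orig.getD k none = some v))
    (t : Nat) (ht1 : m + 1 ≤ t) (ht2 : t ≤ e) :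
    (pvInnerUpto (m : Int) (t : Int) d).1.length = orig.length ∧
    (∀ k, m < k → k < t → orig.getD k none = some v →
        (pvInnerUpto (m : Int) (t : Int) d).1.getD k none = none) ∧
    (∀ k, ¬(m < k ∧ k < t ∧ orig.getD k none = some v) →
        (pvInnerUpto (m : Int) (t : Int) d).1.getD k none = d.getD k none) ∧
    ((pvInnerUpto (m : Int) (t : Int) d).2 = true ↔
        ∃ j, m < j ∧ j < t ∧ orig.getD j none = some v) := by
  induction t, ht1 using Nat.le_induction with
  | base =>
    unfold pvInnerUpto
    rw [show ((m + 1 : Nat) : Int) = (m : Int) + 1 by push_cast; ring,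
      PySem.List.pyRange_one_eq_nil le_rfl]
    refine ⟨hlen, fun k h1 h2 _ => by omega, fun k _ => rfl, by simp; intro j h1 h2; omega⟩
  | succ t ht1 ih =>
    have ht2' : t ≤ e := by omega
    obtain ⟨ihlen, ih2, ih3, ih4⟩ := ih ht2'
    rw [pvInnerUpto_succ m t d ht1]
    dsimp only
    simp only [PySem.List.pyGetD_natCast]
    set st := pvInnerUpto (m : Int) (t : Int) d with hst
    have hstt : st.1.getD t none = d.getD t none :=
      ih3 t (by omega)
    have hstm : st.1.getD m none = d.getD m none :=
      ih3 m (by omega)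
    rw [hstt, hstm, hdm]
    cases hdt : d.getD t none with
    | none =>
      rw [if_pos rfl]
      have hnot : orig.getD t none ≠ some v := by
        intro h
        rw [(hchar t (by omega) (by omega)).2 h] at hdt
        simp at hdt
      refine ⟨ihlen, ?_, ?_, ?_⟩
      · intro k h1 h2 h3
        rcases Nat.lt_or_ge k t with hk | hk
        · exact ih2 k h1 hk h3
        · have : k = t := by omega
          rw [this] at h3; exact absurd h3 hnot
      · intro k hk
        exact ih3 k (fun q => hk ⟨q.1, by omega, q.2.2⟩)
      · rw [ih4]
        constructor
        · rintro ⟨j, hj1, hj2, hj3⟩; exact ⟨j, hj1, by omega, hj3⟩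
        · rintro ⟨j, hj1, hj2, hj3⟩
          rcases Nat.lt_or_ge j t with hj | hj
          · exact ⟨j, hj1, hj, hj3⟩
          · have : j = t := by omega
            rw [this] at hj3; exact absurd hj3 hnot
    | some w =>
      rw [if_neg (by simp)]
      by_cases hwv : v = w
      · subst hwv
        rw [if_pos rfl]
        have hot : orig.getD t none = some v := (hchar t (by omega) (by omega)).1 hdt
        simp only [PySem.List.pySetD_natCast]
        have htL : t < st.1.length := by rw [ihlen]; omega
        refine ⟨by simp [ihlen], ?_, ?_, ?_⟩
        · intro k h1 h2 h3
          rw [pvGetD_set]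
          by_cases hkt : t = k
          · rw [if_pos ⟨hkt, htL⟩]
          · rw [if_neg (by tauto)]
            exact ih2 k h1 (by omega) h3
        · intro k hk
          have hkt : k ≠ t := by
            intro h; exact hk ⟨by omega, by omega, h ▸ hot⟩
          rw [pvGetD_set, if_neg (by tauto)]
          exact ih3 k (fun q => hk ⟨q.1, by omega, q.2.2⟩)
        · constructor
          · intro _; exact ⟨t, by omega, by omega, hot⟩
          · intro _; simp
      · rw [if_neg (by simpa using hwv)]
        have hnot : orig.getD t none ≠ some v := by
          intro h
          rw [(hchar t (by omega) (by omega)).2 h] at hdt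
          exact hwv (by simpa using hdt)
        refine ⟨ihlen, ?_, ?_, ?_⟩
        · intro k h1 h2 h3
          rcases Nat.lt_or_ge k t with hk | hk
          · exact ih2 k h1 hk h3
          · have : k = t := by omega
            rw [this] at h3; exact absurd h3 hnot
        · intro k hk
          exact ih3 k (fun q => hk ⟨q.1, by omega, q.2.2⟩)
        · rw [ih4]
          constructor
          · rintro ⟨j, hj1, hj2, hj3⟩; exact ⟨j, hj1, by omega, hj3⟩
          · rintro ⟨j, hj1, hj2, hj3⟩
            rcases Nat.lt_or_ge j t with hj | hj
            · exact ⟨j, hj1, hj, hj3⟩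
            · have : j = t := by omega
              rw [this] at hj3; exact absurd hj3 hnot
theorem pvFoldA_succ (orig : List (Option Int)) (e : Int) (s m : Nat) (h : s ≤ m) :
    (PySem.List.pyRange (s : Int) ((m + 1 : Nat) : Int) 1).foldl (pvBodyA e) orig
      = pvBodyA e ((PySem.List.pyRange (s : Int) (m : Int) 1).foldl (pvBodyA e) orig) (m : Int) := by
  have h1 : ((m + 1 : Nat) : Int) = (m : Int) + 1 := by push_cast; ring
  rw [h1, PySem.List.pyRange_one_succ_right (by exact_mod_cast h), List.foldl_append]
  rfl

theorem pvNullA_mono (orig : List (Option Int)) (s e m m' k : Nat) (h : m ≤ m')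
    (hP : pvNullA orig s e m k) : pvNullA orig s e m' k := by
  obtain ⟨h1, h2, j, hj1, hj2, hj3, hj4, hj5, hj6⟩ := hP
  exact ⟨h1, h2, j, hj1, hj2, hj3, by omega, hj5, hj6⟩

theorem pvOuterA_inv (orig : List (Option Int)) (s e : Nat) (he : e ≤ orig.length)
    (m : Nat) (hsm : s ≤ m) (hme : m ≤ e) :
    pvInvList orig (pvNullA orig s e m)
      ((PySem.List.pyRange (s : Int) (m : Int) 1).foldl (pvBodyA (e : Int)) orig) := by
  induction m, hsm using Nat.le_induction with
  | base =>
    rw [PySem.List.pyRange_one_eq_nil le_rfl]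
    exact ⟨rfl, fun k => ⟨fun hP => (by obtain ⟨a, b, j, c, _, _, d, _⟩ := hP; omega),
      fun _ => rfl⟩⟩
  | succ m hsm ih =>
    have hme' : m ≤ e := by omega
    have hmlen : m < orig.length := by omega
    obtain ⟨hdlen, hdk⟩ := ih hme'
    rw [pvFoldA_succ orig (e : Int) s m hsm, pvBodyA_eq]
    simp only [PySem.List.pyGetD_natCast]
    set d := (PySem.List.pyRange (s : Int) (m : Int) 1).foldl (pvBodyA (e : Int)) orig with hd
    cases hdm : d.getD m none with
    | none =>
      rw [if_pos rfl]
      -- value at m already gone: nothing happens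
      have hiff : ∀ k, pvNullA orig s e (m + 1) k ↔ pvNullA orig s e m k := by
        intro k
        refine ⟨?_, pvNullA_mono orig s e m (m + 1) k (by omega)⟩
        rintro ⟨h1, h2, j, hj1, hj2, hj3, hj4, hj5, hj6⟩
        by_cases hold : k < m ∨ j < m
        · exact ⟨h1, h2, j, hj1, hj2, hj3, hold, hj5, hj6⟩
        · push_neg at hold
          by_cases hPm : pvNullA orig s e m m
          · obtain ⟨g1, g2, j0, gj1, gj2, gj3, gj4, gj5, gj6⟩ := hPm
            have gj0 : j0 < m := by omega
            rcases (by omega : k = m ∨ j = m) with hk | hj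
            · subst hk
              exact ⟨h1, h2, j0, gj1, gj2, gj3, Or.inr gj0, gj5, hj6⟩
            · subst hj
              refine ⟨h1, h2, j0, gj1, gj2, by omega, Or.inr gj0, ?_, hj6⟩
              rw [gj5, hj5]
          · have h0 : orig.getD m none = none := by
              rw [← (hdk m).2 hPm]; exact hdm
            rcases (by omega : k = m ∨ j = m) with hk | hj
            · subst hk; exact absurd h0 hj6
            · subst hj; rw [hj5] at h0; exact absurd h0 hj6
      exact ⟨hdlen, fun k => ⟨fun hP => (hdk k).1 ((hiff k).1 hP),
        fun hP => (hdk k).2 (fun q => hP ((hiff k).2 q))⟩⟩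
    | some v =>
      rw [if_neg (by simp)]
      have hnPm : ¬ pvNullA orig s e m m := by
        intro hPm; rw [(hdk m).1 hPm] at hdm; simp at hdm
      have h0' : orig.getD m none = some v := by rw [← (hdk m).2 hnPm]; exact hdm
      have hNF : ∀ j, s ≤ j → j < m → orig.getD j none ≠ some v := by
        intro j h1 h2 h3
        exact hnPm ⟨hsm, by omega, j, h1, by omega, by omega, Or.inr h2,
          by rw [h3, h0'], by rw [h0']; simp⟩
      have hchar : ∀ k, m < k → k < e → (d.getD k none = some v ↔ orig.getD k none = some v) := by
        intro k hk1 hk2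
        constructor
        · intro h
          by_cases hPk : pvNullA orig s e m k
          · rw [(hdk k).1 hPk] at h; simp at h
          · rw [← (hdk k).2 hPk]; exact h
        · intro h
          have hnPk : ¬ pvNullA orig s e m k := by
            rintro ⟨g1, g2, j, gj1, gj2, gj3, gj4, gj5, gj6⟩
            have hjm : j < m := by omega
            exact hNF j gj1 hjm (by rw [gj5, h])
          rw [(hdk k).2 hnPk]; exact h
      obtain ⟨ihlen, ih2, ih3, ih4⟩ := pvInnerA_inv orig d s e m v he hsm (by omega)
        (by rw [hdlen]) hdm hchar e (by omega) le_rfl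
      cases hflag : (pvInnerUpto (m : Int) (e : Int) d).2 with
      | false =>
        rw [if_neg (by simp)]
        have hnoj : ∀ j, m < j → j < e → orig.getD j none ≠ some v := by
          intro j h1 h2 h3
          have : (pvInnerUpto (m : Int) (e : Int) d).2 = true := ih4.2 ⟨j, h1, h2, h3⟩
          rw [hflag] at this; exact Bool.noConfusion this
        have hall : ∀ k, (pvInnerUpto (m : Int) (e : Int) d).1.getD k none = d.getD k none := by
          intro k
          refine ih3 k ?_
          rintro ⟨q1, q2, q3⟩; exact hnoj k q1 q2 q3
        have hiff : ∀ k, pvNullA orig s e (m + 1) k ↔ pvNullA orig s e m k := by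
          intro k
          refine ⟨?_, pvNullA_mono orig s e m (m + 1) k (by omega)⟩
          rintro ⟨h1, h2, j, hj1, hj2, hj3, hj4, hj5, hj6⟩
          by_cases hold : k < m ∨ j < m
          · exact ⟨h1, h2, j, hj1, hj2, hj3, hold, hj5, hj6⟩
          · push_neg at hold
            rcases (by omega : k = m ∨ j = m) with hk | hj
            · rw [hk, h0'] at hj5
              rcases Nat.lt_or_ge j m with q | q
              · exact absurd hj5 (hNF j hj1 q)
              · have hq : m < j := by omega
                exact absurd hj5 (hnoj j hq hj2)
            · rw [hj, h0'] at hj5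
              have h5 : orig.getD k none = some v := hj5.symm
              rcases Nat.lt_or_ge k m with q | q
              · exact absurd h5 (hNF k h1 q)
              · have hq : m < k := by omega
                exact absurd h5 (hnoj k hq h2)
        refine ⟨by rw [ihlen], fun k => ⟨?_, ?_⟩⟩
        · intro hP; rw [hall k]; exact (hdk k).1 ((hiff k).1 hP)
        · intro hP; rw [hall k]; exact (hdk k).2 (fun q => hP ((hiff k).2 q))
      | true =>
        rw [if_pos rfl]
        simp only [PySem.List.pySetD_natCast]
        obtain ⟨j1, hj11, hj12, hj13⟩ := ih4.1 hflag
        have hmL : m < (pvInnerUpto (m : Int) (e : Int) d).1.length := by rw [ihlen]; omega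
        have hPm1 : pvNullA orig s e (m + 1) m :=
          ⟨hsm, by omega, j1, by omega, hj12, by omega, Or.inl (by omega),
            by rw [hj13, h0'], by rw [h0']; simp⟩
        refine ⟨by simp [ihlen], fun k => ⟨?_, ?_⟩⟩
        · intro hP
          rw [pvGetD_set]
          by_cases hkm : m = k
          · rw [if_pos ⟨hkm, hmL⟩]
          · rw [if_neg (by tauto)]
            obtain ⟨h1, h2, j, hj1, hj2, hj3, hj4, hj5, hj6⟩ := hP
            by_cases hcase : m < k ∧ orig.getD k none = some v
            · exact ih2 k hcase.1 h2 hcase.2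
            · have hPk : pvNullA orig s e m k := by
                rcases Nat.lt_or_ge k m with q | q
                · exact ⟨h1, h2, j, hj1, hj2, hj3, Or.inl q, hj5, hj6⟩
                · have hkm' : m < k := by omega
                  have hjm : j ≠ m := by
                    intro hj; subst hj
                    rw [h0'] at hj5
                    exact hcase ⟨hkm', hj5.symm⟩
                  have hjlt : j < m := by omega
                  exact ⟨h1, h2, j, hj1, hj2, hj3, Or.inr hjlt, hj5, hj6⟩
              rw [ih3 k (fun q => hcase ⟨q.1, q.2.2⟩)]
              exact (hdk k).1 hPk
        · intro hP
          have hkm : k ≠ m := fun h => hP (h ▸ hPm1)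
          rw [pvGetD_set, if_neg (by tauto)]
          have hncase : ¬(m < k ∧ k < e ∧ orig.getD k none = some v) := by
            rintro ⟨q1, q2, q3⟩
            exact hP ⟨by omega, q2, m, hsm, by omega, by omega, Or.inr (by omega),
              by rw [h0', q3], by rw [q3]; simp⟩
          rw [ih3 k hncase]
          exact (hdk k).2 (fun q => hP (pvNullA_mono orig s e m (m + 1) k (by omega) q))

-- ===== VERDICT (by name: the statement is the Claim_ definition above) =====
theorem remove_duplicate_behaviour_spec : Claim_equal_remove_duplicate_behaviour := by
  intro data start end_ _hdom hpre
  unfold Spec_remove_duplicate_behaviour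
  by_cases hse : end_ ≤ start
  · rw [pvA_eq_fold, pvB_eq_fold, PySem.List.pyRange_one_eq_nil hse]
    rfl
  · rcases hpre with h | ⟨h0, hlen⟩
    · exact absurd h hse
    push_neg at hse
    rw [PySem.List.len_eq] at hlen
    obtain ⟨s, rfl⟩ : ∃ s : Nat, (s : Int) = start := ⟨start.toNat, Int.toNat_of_nonneg h0⟩
    obtain ⟨e, rfl⟩ : ∃ e : Nat, (e : Int) = end_ :=
      ⟨end_.toNat, Int.toNat_of_nonneg (le_of_lt (lt_of_le_of_lt h0 hse))⟩
    have hse' : s ≤ e := by exact_mod_cast le_of_lt hse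
    have hlen' : e ≤ data.length := by exact_mod_cast hlen
    have hA := pvOuterA_inv data s e hlen' e hse' le_rfl
    have hB := (pvLoopB_inv data s (le_trans hse' hlen') e hse' hlen').1
    rw [pvA_eq_fold, pvB_eq_fold]
    have hPP : ∀ k, pvNullA data s e e k ↔ pvNullB data s e k := by
      intro k
      unfold pvNullA pvNullB
      constructor
      · rintro ⟨h1, h2, j, hj1, hj2, hj3, _, hj5, hj6⟩
        exact ⟨h1, h2, j, hj1, hj2, hj3, hj5, hj6⟩
      · rintro ⟨h1, h2, j, hj1, hj2, hj3, hj5, hj6⟩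
        exact ⟨h1, h2, j, hj1, hj2, hj3, Or.inl h2, hj5, hj6⟩
    have hB' : pvInvList data (pvNullA data s e e)
        (((PySem.List.pyRange (s : Int) (e : Int) 1).foldl pvBodyB (data, PySem.Dict.empty)).1) := by
      obtain ⟨hl, hk⟩ := hB
      exact ⟨hl, fun k => ⟨fun hp => (hk k).1 ((hPP k).1 hp), fun hp => (hk k).2 (fun q => hp ((hPP k).2 q))⟩⟩
    exact pvInvList_unique data (pvNullA data s e e) _ _ hA hB'
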